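-- pv_equiv track=rewrite | github.com/Ephil012/CSP_Solver | main.py | mrv
-- ===== SOURCE A (Python) =====
-- def mrv(assignments):
--     # Holds the max MRV value found
--     max = len(assignments[0])
--     # Holds the index of the max MRV values found
--     max_items = [0]
--     # Search for max items
--     for i in range(1, len(assignments)):
--         item = assignments[i]
--         if len(item) > max:
--             max = len(item)
--             max_items = [i]
--         elif len(item) == max:
--             max_items.append(i)
--     return max_items
-- ===== SOURCE B (Python) =====
-- def mrv(assignments):
--     # two passes: find the max length, then collect indices attaining it
--     max_len = len(assignments[0])
--     for a in assignments[1:]: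
--         if len(a) > max_len:
--             max_len = len(a)
--     return [i for i, a in enumerate(assignments) if len(a) == max_len]
-- ===== Notes on version B (the rewrite author's own statement) =====
-- stated objective: simpler
-- what changed: Replaces A's single pass maintaining both a running max and a running index list with two plain passes: first compute the maximum length, then filter enumerate for indices attaining it.
import Mathlib
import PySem

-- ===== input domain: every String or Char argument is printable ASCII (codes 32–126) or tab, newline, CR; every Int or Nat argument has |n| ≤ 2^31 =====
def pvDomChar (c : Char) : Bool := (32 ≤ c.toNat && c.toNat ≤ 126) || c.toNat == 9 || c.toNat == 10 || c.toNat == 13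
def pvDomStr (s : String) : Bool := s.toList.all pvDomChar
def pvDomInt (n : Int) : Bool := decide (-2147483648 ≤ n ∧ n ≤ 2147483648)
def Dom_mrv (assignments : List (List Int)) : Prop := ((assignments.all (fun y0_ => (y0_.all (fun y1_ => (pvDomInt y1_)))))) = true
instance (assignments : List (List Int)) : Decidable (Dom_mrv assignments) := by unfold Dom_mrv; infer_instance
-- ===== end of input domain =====

-- B replaces A's single pass maintaining a running max plus index list with two passes
-- (max length, then filter of enumerate); proved to return the same list on nonempty input.


-- ===== PORT A =====
def mrv (assignments : List (List Int)) : List Int :=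
  let st := (PySem.List.pyRange 1 (assignments.length : Int) 1).foldl
    (fun (st : Int × List Int) i =>
      let item := PySem.List.pyGetD assignments i []
      if (item.length : Int) > st.1 then ((item.length : Int), [i])
      else if (item.length : Int) = st.1 then (st.1, st.2 ++ [i])
      else st)
    (((PySem.List.pyGetD assignments 0 []).length : Int), ([0] : List Int))
  st.2

-- ===== PORT B =====
def mrv_alt (assignments : List (List Int)) : List Int :=
  let maxLen : Int :=
    (PySem.List.slice assignments (some 1) none).foldl
      (fun m a => if (a.length : Int) > m then (a.length : Int) else m)
      ((PySem.List.pyGetD assignments 0 []).length : Int)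
  ((PySem.List.enumerate assignments 0).filter (fun p => (p.2.length : Int) == maxLen)).map
    (fun p => p.1)

-- ===== PRECONDITION & SPEC =====
-- Pre_ excludes only the empty list, on which A raises IndexError (assignments[0]).
def Pre_mrv (assignments : List (List Int)) : Prop := assignments ≠ []
instance (assignments : List (List Int)) : Decidable (Pre_mrv assignments) := by unfold Pre_mrv; infer_instance
def pvWitness_mrv : List (List Int) := [[1]]

def Spec_mrv (assignments : List (List Int)) (out : List Int) : Prop := out = mrv_alt assignments
instance (assignments : List (List Int)) (out : List Int) : Decidable (Spec_mrv assignments out) := by unfold Spec_mrv; infer_instance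

-- ===== CLAIM (what is proved, stated in full; the proofs are below) =====
def Claim_equal_mrv : Prop := ∀ (assignments : List (List Int)), Dom_mrv assignments → Pre_mrv assignments → Spec_mrv assignments (mrv assignments)

-- ===== LEMMAS AND PROOFS =====

-- running max of B's first pass
def fmax (init : Int) (l : List (List Int)) : Int :=
  l.foldl (fun m a => if (a.length : Int) > m then (a.length : Int) else m) init

lemma le_fmax_init (init : Int) (l : List (List Int)) : init ≤ fmax init l := by
  induction l generalizing init with
  | nil => simp [fmax]
  | cons x xs ih =>
    simp only [fmax, List.foldl_cons]
    split_ifs with h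
    · exact le_trans (le_of_lt h) (ih _)
    · exact ih init

lemma mem_le_fmax (l : List (List Int)) : ∀ (init : Int) (x : List Int), x ∈ l →
    (x.length : Int) ≤ fmax init l := by
  induction l with
  | nil => intro _ _ hx; simp at hx
  | cons y ys ih =>
    intro init x hx
    rcases List.mem_cons.mp hx with rfl | h
    · simp only [fmax, List.foldl_cons]
      split_ifs with h'
      · exact le_fmax_init _ _
      · exact le_trans (le_of_not_gt h') (le_fmax_init _ _)
    · simpa only [fmax, List.foldl_cons] using ih _ x h

lemma fmax_append (init : Int) (l : List (List Int)) (b : List Int) :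
    fmax init (l ++ [b]) =
      if (b.length : Int) > fmax init l then (b.length : Int) else fmax init l := by
  simp [fmax, List.foldl_append]

-- the body of A's loop, as a named function of the scanned list
def stepA (xs : List (List Int)) (st : Int × List Int) (i : Int) : Int × List Int :=
  let item := PySem.List.pyGetD xs i []
  if (item.length : Int) > st.1 then ((item.length : Int), [i])
  else if (item.length : Int) = st.1 then (st.1, st.2 ++ [i])
  else st

lemma stepA_prefix (xs : List (List Int)) (b : List Int) (st : Int × List Int) (i : Int)
    (h0 : 0 ≤ i) (h1 : i < (xs.length : Int)) : stepA (xs ++ [b]) st i = stepA xs st i := by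
  unfold stepA
  rw [PySem.List.pyGetD_eq_getElem _ _ h0 (by simp; omega),
      PySem.List.pyGetD_eq_getElem _ _ h0 h1,
      List.getElem_append_left (by omega)]

-- A's loop over indices 1..n computes (max length, indices attaining it)
lemma mrv_loop (a : List Int) (rest : List (List Int)) :
    (PySem.List.pyRange 1 (((a :: rest).length : Int)) 1).foldl
      (fun (st : Int × List Int) i =>
        let item := PySem.List.pyGetD (a :: rest) i []
        if (item.length : Int) > st.1 then ((item.length : Int), [i])
        else if (item.length : Int) = st.1 then (st.1, st.2 ++ [i])
        else st)
      (((a.length : Int)), ([0] : List Int))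
    = (fmax (a.length : Int) rest,
       ((PySem.List.enumerate (a :: rest) 0).filter
          (fun p => (p.2.length : Int) == fmax (a.length : Int) rest)).map (fun p => p.1)) := by
  show List.foldl (stepA (a :: rest)) (((a.length : Int)), ([0] : List Int)) _ = _
  induction rest using List.reverseRecOn with
  | nil =>
      simp [fmax, PySem.List.pyRange_one_eq_nil (le_refl (1 : Int)),
            PySem.List.enumerate_cons, PySem.List.enumerate_nil]
  | append_singleton rest' b ih =>
      have hlen : (((a :: (rest' ++ [b])).length : Int)) = ((a :: rest').length : Int) + 1 := by
        simp
      have hcong := PySem.List.foldl_congr_mem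
          (PySem.List.pyRange 1 ((a :: rest').length : Int))
          (stepA (a :: (rest' ++ [b]))) (stepA (a :: rest'))
          (((a.length : Int)), ([0] : List Int))
          (by
            intro acc x hx
            obtain ⟨hx1, hx2⟩ := PySem.List.mem_pyRange_one.mp hx
            have := stepA_prefix (a :: rest') b acc x (by omega) hx2
            simpa using this)
      rw [hlen, PySem.List.pyRange_one_succ_right (by simp), List.foldl_append, hcong, ih,
          ← List.cons_append]
      have hn : (0 : Int) ≤ ((a :: rest').length : Int) := by positivity
      have hgetb : PySem.List.pyGetD ((a :: rest') ++ [b]) ((a :: rest').length : Int) [] = b := by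
        rw [PySem.List.pyGetD_eq_getElem _ _ hn (by simp)]
        simp
      have henum : PySem.List.enumerate ([b] : List (List Int)) (0 + ((a :: rest').length : Int))
          = [(0 + ((a :: rest').length : Int), b)] := by
        simp [PySem.List.enumerate_cons, PySem.List.enumerate_nil]
      rw [PySem.List.enumerate_append, henum, List.filter_append, List.map_append, fmax_append]
      simp only [List.foldl_cons, List.foldl_nil, stepA]
      rw [hgetb]
      split_ifs with hgt heq
      · -- new strict max: earlier indices all drop out of the filter
        simp
        constructor
        · have := le_fmax_init ((a.length : Int)) rest'
          omega
        · intro i x hx hlen'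
          obtain ⟨k, hk, hp⟩ := (PySem.List.mem_enumerate_iff _ _ _).mp hx
          have hx2 : x ∈ rest' := by
            have := (Prod.mk.injEq _ _ _ _).mp hp
            exact this.2 ▸ List.getElem_mem hk
          have := mem_le_fmax rest' ((a.length : Int)) x hx2
          omega
      · -- equal: the new index is appended
        simp [heq]
      · -- smaller: nothing changes
        have hne : ¬ ((b.length : Int) == fmax (↑a.length) rest') = true := by
          simp only [beq_iff_eq]; omega
        simp [hne]

theorem mrv_spec : Claim_equal_mrv := by
  intro assignments _ hpre
  unfold Spec_mrv
  cases assignments with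
  | nil => exact absurd rfl hpre
  | cons a rest =>
    show mrv (a :: rest) = mrv_alt (a :: rest)
    unfold mrv mrv_alt
    rw [show PySem.List.slice (a :: rest) (some 1) none = rest from by
      simpa using PySem.List.slice_from_natCast (a :: rest) 1]
    rw [show PySem.List.pyGetD (a :: rest) 0 [] = a from PySem.List.pyGetD_zero_cons a rest []]
    simp only []
    rw [mrv_loop a rest]
    rfl
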